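-- pv_equiv track=rewrite | github.com/aryashah2k/HBM-Wake-Sleep-Network-Reorg | scripts/04_thalamocortical.py | find_contiguous_blocks
-- ===== SOURCE A (Python) =====
-- def find_contiguous_blocks(stage_labels, censor_mask, target_stage, min_length):
--     """
--     Find contiguous blocks of TRs with the same stage label.
--
--     Args:
--         stage_labels: per-TR stage labels
--         censor_mask: boolean mask (True = valid)
--         target_stage: stage to find blocks of
--         min_length: minimum block length in TRs
--
--     Returns:
--         list of (start_idx, end_idx) tuples
--     """
--     n_trs = len(stage_labels)
--     blocks = []
--     current_start = None
--
--     for i in range(n_trs):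
--         is_target = (stage_labels[i] == target_stage) and censor_mask[i]
--
--         if is_target:
--             if current_start is None:
--                 current_start = i
--         else:
--             if current_start is not None:
--                 length = i - current_start
--                 if length >= min_length:
--                     blocks.append((current_start, i))
--                 current_start = None
--
--     # Handle block at end
--     if current_start is not None:
--         length = n_trs - current_start
--         if length >= min_length:
--             blocks.append((current_start, n_trs))
--
--     return blocks
-- ===== SOURCE B (Python) =====
-- def find_contiguous_blocks(stage_labels, censor_mask, target_stage, min_length):
--     flags = [s == target_stage and m for s, m in zip(stage_labels, censor_mask)]
--
--     def rec(fl, offset):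
--         if True not in fl:
--             return []
--         i = fl.index(True)
--         tail = fl[i:]
--         j = i + (tail.index(False) if False in tail else len(tail))
--         block = [(offset + i, offset + j)] if j - i >= min_length else []
--         return block + rec(fl[j:], offset + j)
--
--     return rec(flags, 0)
-- ===== Notes on version B (the rewrite author's own statement) =====
-- stated objective: alternative
-- what changed: B replaces A's element-by-element stateful scan (current_start accumulator) with a recursive skip-search decomposition: it jumps directly to the next run boundary with list.index(True)/index(False), emits the run if long enough, and recurses on the sliced-off remainder.
-- outside the precondition, e.g. on find_contiguous_blocks([2, 2], [True], 2, 1): A raises IndexError, B returns [(0, 1)]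
import Mathlib
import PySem

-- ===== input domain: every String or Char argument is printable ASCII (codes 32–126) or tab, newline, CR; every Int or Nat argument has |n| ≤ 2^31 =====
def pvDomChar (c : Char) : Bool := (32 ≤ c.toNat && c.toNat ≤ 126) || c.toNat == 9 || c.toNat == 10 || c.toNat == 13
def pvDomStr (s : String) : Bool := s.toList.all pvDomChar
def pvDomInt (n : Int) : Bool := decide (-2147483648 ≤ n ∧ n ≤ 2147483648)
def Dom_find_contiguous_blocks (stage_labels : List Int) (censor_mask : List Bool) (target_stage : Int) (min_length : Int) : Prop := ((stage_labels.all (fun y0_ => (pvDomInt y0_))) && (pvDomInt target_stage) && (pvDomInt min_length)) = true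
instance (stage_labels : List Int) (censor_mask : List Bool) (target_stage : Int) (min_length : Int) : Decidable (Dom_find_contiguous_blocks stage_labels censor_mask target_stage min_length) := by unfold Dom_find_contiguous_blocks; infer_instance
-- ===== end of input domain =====

-- B finds blocks by recursive skip-search (jump to the next run boundary with index lookups, slice off the
-- processed prefix, recurse) instead of A's element-by-element stateful scan; same cost, different
-- decomposition (objective: alternative).

-- ===== PORT A =====
def find_contiguous_blocks (stage_labels : List Int) (censor_mask : List Bool) (target_stage : Int) (min_length : Int) : List (Int × Int) :=
  let n_trs : Int := (stage_labels.length : Int)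
  let st := (PySem.List.pyRange 0 n_trs 1).foldl
    (fun (acc : List (Int × Int) × Option Int) i =>
      let is_target := decide ((PySem.List.pyGet? stage_labels i).getD 0 = target_stage)
                        && (PySem.List.pyGet? censor_mask i).getD false
      if is_target then
        match acc.2 with
        | none => (acc.1, some i)
        | some _ => acc
      else
        match acc.2 with
        | some cs => (if min_length ≤ i - cs then acc.1 ++ [(cs, i)] else acc.1, none)
        | none => acc)
    ([], none)
  match st.2 with
  | some cs => if min_length ≤ n_trs - cs then st.1 ++ [(cs, n_trs)] else st.1
  | none => st.1

-- ===== PORT B =====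
-- j = i + (tail.index(False) if False in tail else len(tail))  of Source B
def altNextEnd (fl : List Bool) (i : Nat) : Nat :=
  -- tail = fl[i:] with i ≥ 0: exact as List.drop (PySem.List.slice_from_natCast)
  i + ((PySem.List.index? (fl.drop i) false).getD (fl.drop i).length)

lemma altNextEnd_bounds (fl : List Bool) (i : Nat) (h : PySem.List.index? fl true = some i) :
    1 ≤ altNextEnd fl i ∧ altNextEnd fl i ≤ fl.length := by
  obtain ⟨hi, hget, -⟩ := PySem.List.getElem_of_index?_eq_some h
  unfold altNextEnd
  cases hk : PySem.List.index? (fl.drop i) false with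
  | none => simp only [Option.getD_none, List.length_drop]; omega
  | some k =>
    obtain ⟨hklt, hkget, -⟩ := PySem.List.getElem_of_index?_eq_some hk
    have hk0 : k ≠ 0 := by
      intro h0
      subst h0
      have h00 : (fl.drop i)[0]'hklt = fl[i]'hi := by simp
      rw [h00, hget] at hkget
      simp at hkget
    simp only [Option.getD_some]
    simp only [List.length_drop] at hklt
    omega

-- rec(fl, offset) of Source B
def altRec (min_length : Int) (fl : List Bool) (offset : Int) : List (Int × Int) :=
  match h : PySem.List.index? fl true with
  | none => []
  | some i =>
    let j := altNextEnd fl i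
    (if min_length ≤ (j : Int) - (i : Int) then [(offset + (i : Int), offset + (j : Int))] else []) ++
      altRec min_length (fl.drop j) (offset + (j : Int))
termination_by fl.length
decreasing_by
  have hb := altNextEnd_bounds fl i h
  obtain ⟨hi, -, -⟩ := PySem.List.getElem_of_index?_eq_some h
  simp only [List.length_drop]
  omega

def find_contiguous_blocks_alt (stage_labels : List Int) (censor_mask : List Bool) (target_stage : Int) (min_length : Int) : List (Int × Int) :=
  let flags := (stage_labels.zip censor_mask).map (fun p => decide (p.1 = target_stage) && p.2)
  altRec min_length flags 0

-- ===== PRECONDITION & SPEC =====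
-- Pre_ excludes exactly the inputs where Python A raises IndexError: a target-stage label at an index
-- at or beyond len(censor_mask) makes A evaluate censor_mask[i] out of range.
def Pre_find_contiguous_blocks (stage_labels : List Int) (censor_mask : List Bool) (target_stage : Int) (min_length : Int) : Prop :=
  ∀ x ∈ stage_labels.drop censor_mask.length, x ≠ target_stage
instance (stage_labels : List Int) (censor_mask : List Bool) (target_stage : Int) (min_length : Int) : Decidable (Pre_find_contiguous_blocks stage_labels censor_mask target_stage min_length) := by unfold Pre_find_contiguous_blocks; infer_instance

def pvWitness_find_contiguous_blocks : List Int × List Bool × Int × Int :=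
  ([2, 2, 1, 2, 2, 2], [true, true, true, true, false, true], 2, 2)

def Spec_find_contiguous_blocks (stage_labels : List Int) (censor_mask : List Bool) (target_stage : Int) (min_length : Int) (out : List (Int × Int)) : Prop := out = find_contiguous_blocks_alt stage_labels censor_mask target_stage min_length
instance (stage_labels : List Int) (censor_mask : List Bool) (target_stage : Int) (min_length : Int) (out : List (Int × Int)) : Decidable (Spec_find_contiguous_blocks stage_labels censor_mask target_stage min_length out) := by unfold Spec_find_contiguous_blocks; infer_instance

-- ===== CLAIM (what is proved, stated in full; the proofs are below) =====
def Claim_equal_find_contiguous_blocks : Prop := ∀ (stage_labels : List Int) (censor_mask : List Bool) (target_stage : Int) (min_length : Int), Dom_find_contiguous_blocks stage_labels censor_mask target_stage min_length → Pre_find_contiguous_blocks stage_labels censor_mask target_stage min_length → Spec_find_contiguous_blocks stage_labels censor_mask target_stage min_length (find_contiguous_blocks stage_labels censor_mask target_stage min_length)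

-- ===== LEMMAS AND PROOFS =====

-- A's per-index flag
def isTA (t : Int) (labels : List Int) (mask : List Bool) (i : Int) : Bool :=
  decide ((PySem.List.pyGet? labels i).getD 0 = t) && (PySem.List.pyGet? mask i).getD false

def stepA (t ml : Int) (labels : List Int) (mask : List Bool)
    (acc : List (Int × Int) × Option Int) (i : Int) : List (Int × Int) × Option Int :=
  let is_target := decide ((PySem.List.pyGet? labels i).getD 0 = t) && (PySem.List.pyGet? mask i).getD false
  if is_target then
    match acc.2 with
    | none => (acc.1, some i)
    | some _ => acc
  else
    match acc.2 with
    | some cs => (if ml ≤ i - cs then acc.1 ++ [(cs, i)] else acc.1, none)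
    | none => acc

def finA (ml e : Int) (st : List (Int × Int) × Option Int) : List (Int × Int) :=
  match st.2 with
  | some cs => if ml ≤ e - cs then st.1 ++ [(cs, e)] else st.1
  | none => st.1

-- reference block recursion
def refBlocks (ml : Int) : List Bool → Int → Option Int → List (Int × Int)
  | [], _, none => []
  | [], a, some cs => if ml ≤ a - cs then [(cs, a)] else []
  | true :: fs, a, none => refBlocks ml fs (a + 1) (some a)
  | true :: fs, a, some cs => refBlocks ml fs (a + 1) (some cs)
  | false :: fs, a, none => refBlocks ml fs (a + 1) none
  | false :: fs, a, some cs => (if ml ≤ a - cs then [(cs, a)] else []) ++ refBlocks ml fs (a + 1) none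

def flagsOf (labels : List Int) (mask : List Bool) (t : Int) : List Bool :=
  (labels.zip mask).map (fun p => decide (p.1 = t) && p.2)

def padFL (labels : List Int) (mask : List Bool) (t : Int) : List Bool :=
  flagsOf labels mask t ++ List.replicate (labels.length - (flagsOf labels mask t).length) false

lemma foldA_ref (t ml : Int) (labels : List Int) (mask : List Bool) :
    ∀ (fl : List Bool) (a : Int) (blocks : List (Int × Int)) (cur : Option Int),
    (∀ (j : Nat), (hj : j < fl.length) → isTA t labels mask (a + j) = fl[j]) →
    finA ml (a + (fl.length : Int)) ((PySem.List.pyRange a (a + (fl.length : Int)) 1).foldl (stepA t ml labels mask) (blocks, cur))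
      = blocks ++ refBlocks ml fl a cur := by
  intro fl
  induction fl with
  | nil =>
    intro a blocks cur _
    simp only [List.length_nil, Nat.cast_zero, add_zero]
    rw [PySem.List.pyRange_one_eq_nil (le_refl a)]
    cases cur <;> simp [finA, refBlocks] <;> split_ifs <;> simp
  | cons f fs ih =>
    intro a blocks cur h
    have h0 : isTA t labels mask a = f := by simpa using h 0 (Nat.succ_pos _)
    have hrest : ∀ (j : Nat), (hj : j < fs.length) → isTA t labels mask ((a + 1) + j) = fs[j] := by
      intro j hj
      have h' := h (j + 1) (Nat.succ_lt_succ hj)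
      have he : a + (((j : Nat) + 1 : Nat) : Int) = (a + 1) + (j : Int) := by push_cast; ring
      rw [he] at h'
      simpa using h'
    have hlen : a + (((f :: fs).length : Nat) : Int) = (a + 1) + ((fs.length : Nat) : Int) := by
      simp [List.length_cons]; push_cast; ring
    rw [hlen, PySem.List.pyRange_one_cons (by push_cast; omega), List.foldl_cons]
    cases cur with
    | none =>
      cases f with
      | false =>
        have hstep : stepA t ml labels mask (blocks, none) a = (blocks, none) := by
          simp [stepA, show (decide ((PySem.List.pyGet? labels a).getD 0 = t)
            && (PySem.List.pyGet? mask a).getD false) = false from h0]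
        rw [hstep, ih (a + 1) blocks none hrest]
        simp [refBlocks]
      | true =>
        have hstep : stepA t ml labels mask (blocks, none) a = (blocks, some a) := by
          simp [stepA, show (decide ((PySem.List.pyGet? labels a).getD 0 = t)
            && (PySem.List.pyGet? mask a).getD false) = true from h0]
        rw [hstep, ih (a + 1) blocks (some a) hrest]
        simp [refBlocks]
    | some cs =>
      cases f with
      | true =>
        have hstep : stepA t ml labels mask (blocks, some cs) a = (blocks, some cs) := by
          simp [stepA, show (decide ((PySem.List.pyGet? labels a).getD 0 = t)
            && (PySem.List.pyGet? mask a).getD false) = true from h0]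
        rw [hstep, ih (a + 1) blocks (some cs) hrest]
        simp [refBlocks]
      | false =>
        have hstep : stepA t ml labels mask (blocks, some cs) a
            = (if ml ≤ a - cs then blocks ++ [(cs, a)] else blocks, none) := by
          simp [stepA, show (decide ((PySem.List.pyGet? labels a).getD 0 = t)
            && (PySem.List.pyGet? mask a).getD false) = false from h0]
        rw [hstep, ih (a + 1) _ none hrest]
        simp [refBlocks]
        split_ifs <;> simp [List.append_assoc]

lemma refBlocks_replicate (ml : Int) (k : Nat) :
    ∀ (a : Int) (cur : Option Int),
    refBlocks ml (List.replicate k false) a cur = refBlocks ml [] a cur := by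
  induction k with
  | zero => intro a cur; rfl
  | succ n ih =>
    intro a cur
    have h0 : refBlocks ml (List.replicate n false) (a + 1) none = [] := ih (a + 1) none
    cases cur with
    | none =>
      rw [List.replicate_succ]
      show refBlocks ml (List.replicate n false) (a + 1) none = ([] : List (Int × Int))
      exact h0
    | some cs =>
      rw [List.replicate_succ]
      show (if ml ≤ a - cs then [(cs, a)] else []) ++ refBlocks ml (List.replicate n false) (a + 1) none
          = if ml ≤ a - cs then [(cs, a)] else []
      rw [h0, List.append_nil]

lemma refBlocks_pad (ml : Int) (k : Nat) :
    ∀ (fl : List Bool) (a : Int) (cur : Option Int),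
    refBlocks ml (fl ++ List.replicate k false) a cur = refBlocks ml fl a cur := by
  intro fl
  induction fl with
  | nil => intro a cur; simpa using refBlocks_replicate ml k a cur
  | cons f fs ih =>
    intro a cur
    cases cur <;> cases f <;> simp [refBlocks, ih]

lemma length_flagsOf (labels : List Int) (mask : List Bool) (t : Int) :
    (flagsOf labels mask t).length = min labels.length mask.length := by
  simp [flagsOf]

lemma isTA_padFL (t : Int) (labels : List Int) (mask : List Bool)
    (j : Nat) (hj : j < (padFL labels mask t).length) :
    isTA t labels mask ((0 : Int) + j) = (padFL labels mask t)[j] := by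
  have hmin : (flagsOf labels mask t).length = min labels.length mask.length :=
    length_flagsOf labels mask t
  have hlen : (padFL labels mask t).length = labels.length := by
    simp [padFL, hmin]; try omega
  rw [hlen] at hj
  by_cases hcase : j < (flagsOf labels mask t).length
  · have hjl : j < labels.length := by omega
    have hjm : j < mask.length := by omega
    have hget : (padFL labels mask t)[j]'(by rw [hlen]; exact hj)
        = (flagsOf labels mask t)[j]'hcase := by
      simp [padFL, List.getElem_append_left, hcase]
    rw [hget]
    simp [isTA, flagsOf, PySem.List.pyGet?_natCast, List.getElem?_eq_getElem hjl,
      List.getElem?_eq_getElem hjm]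
  · have hml : mask.length ≤ j := by omega
    have hnone : (PySem.List.pyGet? mask ((j : Nat) : Int)) = none := by
      rw [PySem.List.pyGet?_natCast]
      exact List.getElem?_eq_none hml
    have hget : (padFL labels mask t)[j]'(by rw [hlen]; exact hj) = false := by
      show (flagsOf labels mask t ++ List.replicate (labels.length - (flagsOf labels mask t).length) false)[j]'_ = false
      rw [List.getElem_append_right (by omega)]
      simp
    rw [hget]
    simp [isTA, hnone]

-- B-side lemmas: altRec equals refBlocks with no open run
lemma refBlocks_false_prefix (ml : Int) :
    ∀ (pre : List Bool), (∀ x ∈ pre, x = false) → ∀ (g : List Bool) (a : Int),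
    refBlocks ml (pre ++ g) a none = refBlocks ml g (a + (pre.length : Int)) none := by
  intro pre
  induction pre with
  | nil => intro _ g a; simp
  | cons p ps ih =>
    intro h g a
    have hp : p = false := h p (List.mem_cons_self)
    subst hp
    have := ih (fun x hx => h x (List.mem_cons_of_mem _ hx)) g (a + 1)
    simp only [List.cons_append]
    show refBlocks ml (ps ++ g) (a + 1) none = _
    rw [this]
    have h2 : a + 1 + (ps.length : Int) = a + (((false :: ps).length : Nat) : Int) := by
      push_cast [List.length_cons]; ring
    rw [h2]

lemma refBlocks_none_of_no_true (ml : Int) :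
    ∀ (fl : List Bool) (a : Int), PySem.List.index? fl true = none →
    refBlocks ml fl a none = [] := by
  intro fl a h
  have hall : ∀ x ∈ fl, x = false := by
    intro x hx
    have : true ∉ fl := (PySem.List.index?_eq_none_iff fl true).mp h
    cases x with
    | true => exact absurd hx this
    | false => rfl
  have := refBlocks_false_prefix ml fl hall [] a
  simpa using this

-- all-true suffix: the run reaches the end
lemma refBlocks_some_no_false (ml : Int) :
    ∀ (fs : List Bool) (a cs : Int), PySem.List.index? fs false = none →
    refBlocks ml fs a (some cs) = if ml ≤ a + (fs.length : Int) - cs then [(cs, a + (fs.length : Int))] else [] := by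
  intro fs
  induction fs with
  | nil => intro a cs _; simp [refBlocks]
  | cons f fs ih =>
    intro a cs h
    have hf : f = true := by
      cases f with
      | true => rfl
      | false => rw [PySem.List.index?_cons_self] at h; simp at h
    subst hf
    have htail : PySem.List.index? fs false = none := by
      rw [PySem.List.index?_cons_of_ne (x := true) (v := false) fs (by simp)] at h
      simpa using h
    show refBlocks ml fs (a + 1) (some cs) = _
    rw [ih (a + 1) cs htail]
    have h2 : a + (((true :: fs).length : Nat) : Int) = a + 1 + (fs.length : Int) := by
      push_cast [List.length_cons]; ring
    rw [h2]

-- first false at position k: the run ends there and scanning resumes after it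
lemma refBlocks_some_first_false (ml : Int) :
    ∀ (fs : List Bool) (k : Nat) (a cs : Int), PySem.List.index? fs false = some k →
    refBlocks ml fs a (some cs)
      = (if ml ≤ a + (k : Int) - cs then [(cs, a + (k : Int))] else [])
          ++ refBlocks ml (fs.drop (k + 1)) (a + (k : Int) + 1) none := by
  intro fs
  induction fs with
  | nil => intro k a cs h; simp [PySem.List.index?_eq_idxOf?] at h
  | cons f fs ih =>
    intro k a cs h
    cases f with
    | false =>
      have hk : k = 0 := by
        rw [PySem.List.index?_cons_self] at h
        exact (Option.some_inj.mp h).symm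
      subst hk
      show (if ml ≤ a - cs then [(cs, a)] else []) ++ refBlocks ml fs (a + 1) none = _
      simp
    | true =>
      rw [PySem.List.index?_cons_of_ne (x := true) (v := false) fs (by simp)] at h
      cases hk' : PySem.List.index? fs false with
      | none => rw [hk'] at h; simp at h
      | some k' =>
        rw [hk'] at h
        simp only [Option.map_some] at h
        have hkk : k = k' + 1 := (Option.some_inj.mp h).symm
        subst hkk
        show refBlocks ml fs (a + 1) (some cs) = _
        rw [ih k' (a + 1) cs hk']
        simp only [List.drop_succ_cons]
        have h2 : a + (((k' + 1 : Nat)) : Int) = a + 1 + (k' : Int) := by push_cast; ring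
        rw [h2]

lemma altRec_eq_refBlocks (ml : Int) :
    ∀ (n : Nat) (fl : List Bool), fl.length ≤ n → ∀ (a : Int),
    altRec ml fl a = refBlocks ml fl a none := by
  intro n
  induction n with
  | zero =>
    intro fl hlen a
    have : fl = [] := List.eq_nil_of_length_eq_zero (Nat.le_zero.mp hlen)
    subst this
    rw [altRec]
    rfl
  | succ m ih =>
    intro fl hlen a
    rw [altRec]
    cases hidx : PySem.List.index? fl true with
    | none => exact (refBlocks_none_of_no_true ml fl a hidx).symm
    | some i =>
      simp only []
      obtain ⟨hi, hget, hmin⟩ := PySem.List.getElem_of_index?_eq_some hidx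
      -- decompose fl = pre ++ true :: suf with pre all-false of length i
      obtain ⟨pre, suf, hfl, hprelen, hpre⟩ := (PySem.List.index?_eq_some_iff fl true i).mp hidx
      have hpreall : ∀ x ∈ pre, x = false := by
        intro x hx
        cases x with
        | true => exact absurd hx hpre
        | false => rfl
      have hdropi : fl.drop i = true :: suf := by
        rw [hfl, ← hprelen, List.drop_left' rfl]
      -- altNextEnd
      have hbounds := altNextEnd_bounds fl i hidx
      have htail : PySem.List.index? (fl.drop i) false
          = (PySem.List.index? suf false).map (· + 1) := by
        rw [hdropi, PySem.List.index?_cons_of_ne (x := true) (v := false) suf (by simp)]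
      have hrec : ∀ j, 1 ≤ j → j ≤ fl.length →
          altRec ml (fl.drop j) (a + (j : Int)) = refBlocks ml (fl.drop j) (a + (j : Int)) none := by
        intro j h1 h2
        exact ih (fl.drop j) (by simp; omega) _
      -- RHS via prefix skip
      have hrhs : refBlocks ml fl a none = refBlocks ml suf (a + (i : Int) + 1) (some (a + (i : Int))) := by
        rw [hfl, refBlocks_false_prefix ml pre hpreall, hprelen]
        rfl
      cases hsuf : PySem.List.index? suf false with
      | none =>
        -- run reaches the end of fl
        have hne : altNextEnd fl i = fl.length := by
          unfold altNextEnd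
          rw [htail, hsuf]
          simp only [Option.map_none, Option.getD_none, List.length_drop]
          omega
        rw [hne]
        rw [List.drop_length, hrhs, refBlocks_some_no_false ml suf _ _ hsuf]
        rw [altRec]
        have hlensuf : (fl.length : Int) = (i : Int) + 1 + (suf.length : Int) := by
          rw [hfl, ← hprelen]; push_cast [List.length_append, List.length_cons]; ring
        simp only [PySem.List.index?_eq_idxOf?, List.idxOf?_nil]
        rw [show a + (i:Int) + 1 + (suf.length : Int) - (a + (i:Int)) = (fl.length : Int) - (i : Int) by omega]
        rw [show a + (i:Int) + 1 + (suf.length : Int) = a + (fl.length : Int) by omega]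
        split_ifs <;> simp
      | some k =>
        have hkbound : k < suf.length := by
          obtain ⟨hk, -, -⟩ := PySem.List.getElem_of_index?_eq_some hsuf
          exact hk
        have hne : altNextEnd fl i = i + (k + 1) := by
          unfold altNextEnd
          rw [htail, hsuf]
          rfl
        rw [hne]
        -- fl.drop (i + (k+1)) = suf.drop k, whose head is false
        have hsufget : ∃ (hk : k < suf.length), suf[k] = false ∧ True := by
          obtain ⟨hk, hg, -⟩ := PySem.List.getElem_of_index?_eq_some hsuf
          exact ⟨hk, hg, trivial⟩
        have hdropj : fl.drop (i + (k + 1)) = suf.drop k := by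
          rw [hfl, ← hprelen, List.drop_append, List.drop_eq_nil_of_le (by omega),
            show pre.length + (k + 1) - pre.length = k + 1 by omega, List.drop_succ_cons,
            List.nil_append]
        have hsufdrop : suf.drop k = false :: suf.drop (k + 1) := by
          obtain ⟨hk, hg, -⟩ := hsufget
          rw [List.drop_eq_getElem_cons hk, hg]
        -- recursion
        have hflen : fl.length = i + 1 + suf.length := by
          rw [hfl, ← hprelen]; simp [List.length_append]; omega
        have hj1 : 1 ≤ i + (k + 1) := by omega
        have hj2 : i + (k + 1) ≤ fl.length := by omega
        rw [hrec (i + (k + 1)) hj1 hj2]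
        rw [hdropj, hsufdrop]
        show _ ++ refBlocks ml (suf.drop (k + 1)) (a + ((i + (k+1) : Nat) : Int) + 1) none = _
        rw [hrhs, refBlocks_some_first_false ml suf k _ _ hsuf]
        have e1 : a + (i : Int) + 1 + (k : Int) = a + ((i + (k + 1) : Nat) : Int) := by push_cast; ring
        have e2 : ((i + (k + 1) : Nat) : Int) - (i : Int) = a + ((i + (k + 1) : Nat) : Int) - (a + (i : Int)) := by
          push_cast; ring
        rw [e1, ← e2]

-- ===== VERDICT (by name: the statement is the Claim_ definition above) =====
theorem find_contiguous_blocks_spec : Claim_equal_find_contiguous_blocks := by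
  intro labels mask t ml _ _
  show find_contiguous_blocks labels mask t ml = find_contiguous_blocks_alt labels mask t ml
  have hpadlen : (padFL labels mask t).length = labels.length := by
    simp [padFL, length_flagsOf]; try omega
  have hA : find_contiguous_blocks labels mask t ml = refBlocks ml (padFL labels mask t) 0 none := by
    have h1 : find_contiguous_blocks labels mask t ml
        = finA ml ((labels.length : Int))
            ((PySem.List.pyRange 0 (labels.length : Int) 1).foldl (stepA t ml labels mask) ([], none)) := rfl
    rw [h1]
    rw [show ((labels.length : Nat) : Int) = (0 : Int) + ((padFL labels mask t).length : Int) by simp [hpadlen]]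
    rw [foldA_ref t ml labels mask (padFL labels mask t) 0 [] none (isTA_padFL t labels mask)]
    simp
  have hB : find_contiguous_blocks_alt labels mask t ml = altRec ml (flagsOf labels mask t) 0 := rfl
  rw [hA, hB]
  unfold padFL
  rw [refBlocks_pad]
  exact (altRec_eq_refBlocks ml (flagsOf labels mask t).length (flagsOf labels mask t) (le_refl _) 0).symm
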